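-- pv_equiv track=rewrite | github.com/ehz2/Client-Server-Snake | server.py | initialize_snake
-- ===== SOURCE A (Python) =====
-- SPACE_SIZE = 20
--
-- BODY_PARTS = 3
--
-- def initialize_snake(position, direction):
--     """
--     Parameters: position (x,y) of the snake, direction (left, right, etc.) of the snake)
--
--     Function for initializing snakes using their position and direction.
--     Sets up the head and body of the snake in the direction it's facing.
--
--     Returns: List of positions called 'coordinates' that represents the snake
--     """
--
--     # Variables
--     coordinates = []
--     x, y = position
--
--     # Initialize based on direction
--     if direction == "RIGHT":
--         for i in range(BODY_PARTS):
--             coordinates.append([x - i * SPACE_SIZE, y])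
--
--     elif direction == "LEFT":
--         for i in range(BODY_PARTS):
--             coordinates.append([x + i * SPACE_SIZE, y])
--
--     elif direction == "UP":
--         for i in range(BODY_PARTS):
--             coordinates.append([x, y + i * SPACE_SIZE])
--
--     elif direction == "DOWN":
--         for i in range(BODY_PARTS):
--             coordinates.append([x, y - i * SPACE_SIZE])
--
--     return coordinates
-- ===== SOURCE B (Python) =====
-- SPACE_SIZE = 20
--
-- BODY_PARTS = 3
--
-- def initialize_snake(position, direction):
--     """Grow the snake recursively: each body cell is the previous cell
--     shifted one SPACE_SIZE opposite to the travel direction."""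
--     def behind(cell):
--         x, y = cell
--         if direction == "RIGHT":
--             return [x - SPACE_SIZE, y]
--         if direction == "LEFT":
--             return [x + SPACE_SIZE, y]
--         if direction == "UP":
--             return [x, y + SPACE_SIZE]
--         return [x, y - SPACE_SIZE]
--
--     def grow(cell, n):
--         if n == 0:
--             return []
--         return [cell] + grow(behind(cell), n - 1)
--
--     if direction not in ("RIGHT", "LEFT", "UP", "DOWN"):
--         return []
--     x, y = position
--     return grow([x, y], BODY_PARTS)
-- ===== Notes on version B (the rewrite author's own statement) =====
-- stated objective: alternative
-- what changed: A computes every segment independently by indexed offset arithmetic (x + i*SPACE_SIZE) appending in four per-direction loops; B grows the snake recursively, deriving each cell from the previous one by a single backward step and cons-building the list, with one upfront membership check for the unknown-direction fall-through.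
import Mathlib
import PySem

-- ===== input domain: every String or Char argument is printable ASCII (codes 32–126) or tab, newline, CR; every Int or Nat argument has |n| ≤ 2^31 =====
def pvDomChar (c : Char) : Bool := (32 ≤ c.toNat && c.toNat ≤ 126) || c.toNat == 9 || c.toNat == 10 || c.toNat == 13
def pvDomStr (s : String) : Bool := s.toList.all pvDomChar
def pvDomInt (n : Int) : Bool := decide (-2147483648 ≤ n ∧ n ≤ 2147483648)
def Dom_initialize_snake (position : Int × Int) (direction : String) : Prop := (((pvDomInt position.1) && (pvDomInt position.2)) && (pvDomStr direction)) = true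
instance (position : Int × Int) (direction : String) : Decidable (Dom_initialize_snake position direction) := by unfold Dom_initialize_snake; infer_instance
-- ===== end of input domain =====

-- B grows the snake recursively (each cell = previous cell stepped once backwards, cons-built),
-- instead of A's four per-direction indexed-offset append loops: an alternative decomposition.

-- ===== PORT A =====
-- literal transliteration: four branches in A's order, each a foldl-append loop over range(BODY_PARTS)
def initialize_snake (position : Int × Int) (direction : String) : List (List Int) :=
  let x := position.1
  let y := position.2
  if direction = "RIGHT" then
    (PySem.List.pyRange 0 3 1).foldl (fun coordinates i => coordinates ++ [[x - i * 20, y]]) []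
  else if direction = "LEFT" then
    (PySem.List.pyRange 0 3 1).foldl (fun coordinates i => coordinates ++ [[x + i * 20, y]]) []
  else if direction = "UP" then
    (PySem.List.pyRange 0 3 1).foldl (fun coordinates i => coordinates ++ [[x, y + i * 20]]) []
  else if direction = "DOWN" then
    (PySem.List.pyRange 0 3 1).foldl (fun coordinates i => coordinates ++ [[x, y - i * 20]]) []
  else
    []

-- ===== PORT B =====
-- Source B's `behind`: the cell one SPACE_SIZE behind `cell` w.r.t. the travel direction
def pvBehind (direction : String) (cell : Int × Int) : Int × Int :=
  if direction = "RIGHT" then (cell.1 - 20, cell.2)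
  else if direction = "LEFT" then (cell.1 + 20, cell.2)
  else if direction = "UP" then (cell.1, cell.2 + 20)
  else (cell.1, cell.2 - 20)

-- Source B's `grow`: recursive cons-building chain of backward steps
def pvGrow (direction : String) (cell : Int × Int) : Nat → List (List Int)
  | 0 => []
  | n + 1 => [cell.1, cell.2] :: pvGrow direction (pvBehind direction cell) n

def initialize_snake_alt (position : Int × Int) (direction : String) : List (List Int) :=
  if direction = "RIGHT" ∨ direction = "LEFT" ∨ direction = "UP" ∨ direction = "DOWN" then
    pvGrow direction (position.1, position.2) 3
  else []

-- ===== PRECONDITION & SPEC =====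
def Spec_initialize_snake (position : Int × Int) (direction : String) (out : List (List Int)) : Prop := out = initialize_snake_alt position direction
instance (position : Int × Int) (direction : String) (out : List (List Int)) : Decidable (Spec_initialize_snake position direction out) := by unfold Spec_initialize_snake; infer_instance

-- ===== CLAIM (what is proved, stated in full; the proofs are below) =====
def Claim_equal_initialize_snake : Prop := ∀ (position : Int × Int) (direction : String), Dom_initialize_snake position direction → Spec_initialize_snake position direction (initialize_snake position direction)

-- ===== LEMMAS AND PROOFS =====

-- ===== VERDICT (by name: the statement is the Claim_ definition above) =====
theorem initialize_snake_spec : Claim_equal_initialize_snake := by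
  intro position direction _
  unfold Spec_initialize_snake initialize_snake initialize_snake_alt
  by_cases h1 : direction = "RIGHT"
  · simp [h1, pvGrow, pvBehind, PySem.List.pyRange, List.range_succ]
    omega
  by_cases h2 : direction = "LEFT"
  · simp [h2, pvGrow, pvBehind, PySem.List.pyRange, List.range_succ]
    omega
  by_cases h3 : direction = "UP"
  · simp [h3, pvGrow, pvBehind, PySem.List.pyRange, List.range_succ]
    omega
  by_cases h4 : direction = "DOWN"
  · simp [h4, pvGrow, pvBehind, PySem.List.pyRange, List.range_succ]
    omega
  · simp [h1, h2, h3, h4]
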